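-- pv_equiv track=rewrite | github.com/cdimabusinessent-byte/Beacon-version-2 | app/config.py | _to_coinbase_product_id
-- ===== SOURCE A (Python) =====
-- def _to_coinbase_product_id(symbol: str) -> str:
--     if "-" in symbol:
--         return symbol
--
--     for quote in ("USDT", "USDC", "USD", "EUR", "GBP"):
--         if symbol.endswith(quote) and len(symbol) > len(quote):
--             base = symbol[: -len(quote)]
--             return f"{base}-{quote}"
--     return symbol
-- ===== SOURCE B (Python) =====
-- # B: a reversed-suffix automaton (trie encoded as a state-transition table) built
-- # once from the quote list; the conversion walks the symbol's characters
-- # back-to-front through the table instead of testing each quote with endswith.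
-- _QUOTES = ("USDT", "USDC", "USD", "EUR", "GBP")
--
--
-- def _build_suffix_automaton():
--     trans = {}
--     accept = {}
--     nxt = 1  # state 0 is the root
--     for quote in _QUOTES:
--         state = 0
--         for ch in reversed(quote):
--             key = (state, ch)
--             if key not in trans:
--                 trans[key] = nxt
--                 nxt += 1
--             state = trans[key]
--         accept[state] = len(quote)
--     return trans, accept
--
--
-- _TRANS, _ACCEPT = _build_suffix_automaton()
--
--
-- def _to_coinbase_product_id(symbol: str) -> str:
--     if "-" in symbol:
--         return symbol
--     n = len(symbol)
--     state = 0
--     k = 0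
--     while k < n - 1:  # keep the base non-empty
--         state = _TRANS.get((state, symbol[n - 1 - k]))
--         if state is None:
--             break
--         k += 1
--         if state in _ACCEPT:
--             return symbol[: n - k] + "-" + symbol[n - k:]
--     return symbol
-- ===== Notes on version B (the rewrite author's own statement) =====
-- stated objective: alternative
-- what changed: Replaces the five endswith tests by a reversed-suffix trie/DFA: a (state, char) -> state transition table built once from the quote list, walked over the symbol's characters back-to-front until an accepting state or a dead end.
import Mathlib
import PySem

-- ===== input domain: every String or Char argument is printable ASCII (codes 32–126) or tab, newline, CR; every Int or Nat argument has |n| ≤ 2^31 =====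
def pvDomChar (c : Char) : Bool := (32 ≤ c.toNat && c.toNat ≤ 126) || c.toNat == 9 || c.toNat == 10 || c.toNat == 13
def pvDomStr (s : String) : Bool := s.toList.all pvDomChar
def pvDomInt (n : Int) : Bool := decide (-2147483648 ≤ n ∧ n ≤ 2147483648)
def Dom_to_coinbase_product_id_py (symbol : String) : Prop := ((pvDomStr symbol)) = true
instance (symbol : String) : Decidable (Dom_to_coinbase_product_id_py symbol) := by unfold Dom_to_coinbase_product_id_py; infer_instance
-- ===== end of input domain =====

-- B replaces A's five endswith tests by a reversed-suffix trie/DFA table built once from the quote list and walked back-to-front (alternative algorithm; similar cost).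


-- ===== PORT A =====
-- the 'for quote in (…): if symbol.endswith(quote) and len(symbol) > len(quote): return base + "-" + quote' loop
def pvQuoteLoop (symbol : String) : List (List Char) → String
  | [] => symbol
  | q :: qs =>
      if PySem.Chars.endswith symbol.toList q && decide (q.length < symbol.toList.length) then
        String.ofList (PySem.Chars.slice symbol.toList none (some (-(q.length : Int))) ++ '-' :: q)
      else pvQuoteLoop symbol qs

def to_coinbase_product_id_py (symbol : String) : String :=
  if PySem.Str.isIn "-" symbol then symbol
  else pvQuoteLoop symbol ["USDT".toList, "USDC".toList, "USD".toList, "EUR".toList, "GBP".toList]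

-- ===== PORT B =====
-- _build_suffix_automaton: fold over the quotes; inner fold over the reversed quote
-- threading (trans, state, nxt); finally record the accepting state.
def pvBuild : PySem.Dict (Int × Char) Int × PySem.Dict Int Int × Int :=
  ["USDT".toList, "USDC".toList, "USD".toList, "EUR".toList, "GBP".toList].foldl
    (fun acc q =>
      let inner :=
        q.reverse.foldl
          (fun (st : PySem.Dict (Int × Char) Int × Int × Int) ch =>
            let trans := st.1; let state := st.2.1; let nxt := st.2.2
            if trans.contains (state, ch) then
              (trans, (trans.get? (state, ch)).getD 0, nxt)
            else
              (trans.insert (state, ch) nxt, nxt, nxt + 1))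
          (acc.1, 0, acc.2.2)
      (inner.1, acc.2.1.insert inner.2.1 (q.length : Int), inner.2.2))
    (PySem.Dict.empty, PySem.Dict.empty, 1)

def pvTrans : PySem.Dict (Int × Char) Int := pvBuild.1
def pvAccept : PySem.Dict Int Int := pvBuild.2.1

-- the 'while k < n - 1:' walk; symbol[n-1-k] is read with pyGet? (in range, so the
-- none branch is unreachable and merely totalizes the same computation)
def pvWalk (s : List Char) (state : Int) (k : Nat) : String :=
  if h : k < s.length - 1 then
    match PySem.List.pyGet? s ((s.length : Int) - 1 - k) with
    | none => String.ofList s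
    | some c =>
      match pvTrans.get? (state, c) with
      | none => String.ofList s
      | some st' =>
        if pvAccept.contains st' then
          String.ofList (PySem.Chars.slice s none (some ((s.length : Int) - (k + 1))) ++
            '-' :: PySem.Chars.slice s (some ((s.length : Int) - (k + 1))) none)
        else pvWalk s st' (k + 1)
  else String.ofList s
termination_by s.length - k
decreasing_by omega

def to_coinbase_product_id_py_alt (symbol : String) : String :=
  if PySem.Str.isIn "-" symbol then symbol
  else pvWalk symbol.toList 0 0

-- ===== PRECONDITION & SPEC =====
def Spec_to_coinbase_product_id_py (symbol : String) (out : String) : Prop := out = to_coinbase_product_id_py_alt symbol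
instance (symbol : String) (out : String) : Decidable (Spec_to_coinbase_product_id_py symbol out) := by unfold Spec_to_coinbase_product_id_py; infer_instance

-- ===== CLAIM (what is proved, stated in full; the proofs are below) =====
def Claim_equal_to_coinbase_product_id_py : Prop := ∀ (symbol : String), Dom_to_coinbase_product_id_py symbol → Spec_to_coinbase_product_id_py symbol (to_coinbase_product_id_py symbol)

-- ===== LEMMAS AND PROOFS =====

-- the common target both ports are proved equal to: the grouped drop/take form
def pvG (s : List Char) : String :=
  if 4 < s.length ∧ (s.drop (s.length - 4) = "USDT".toList ∨ s.drop (s.length - 4) = "USDC".toList) then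
    String.ofList (s.take (s.length - 4) ++ '-' :: s.drop (s.length - 4))
  else if 3 < s.length ∧ (s.drop (s.length - 3) = "USD".toList ∨ s.drop (s.length - 3) = "EUR".toList ∨ s.drop (s.length - 3) = "GBP".toList) then
    String.ofList (s.take (s.length - 3) ++ '-' :: s.drop (s.length - 3))
  else String.ofList s

theorem pvG_none (s : List Char)
    (h1 : ¬ (4 < s.length ∧ (s.drop (s.length - 4) = "USDT".toList ∨ s.drop (s.length - 4) = "USDC".toList)))
    (h2 : ¬ (3 < s.length ∧ (s.drop (s.length - 3) = "USD".toList ∨ s.drop (s.length - 3) = "EUR".toList ∨ s.drop (s.length - 3) = "GBP".toList))) :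
    pvG s = String.ofList s := by
  unfold pvG; rw [if_neg h1, if_neg h2]

theorem pv_endswith_eq_drop (s q : List Char) :
    PySem.Chars.endswith s q = decide (s.drop (s.length - q.length) = q) := by
  by_cases hq : s.drop (s.length - q.length) = q
  · simp only [hq, decide_true]
    rw [PySem.Chars.endswith_iff]
    exact hq ▸ List.drop_suffix _ _
  · simp only [hq, decide_false]
    rw [Bool.eq_false_iff, Ne, PySem.Chars.endswith_iff]
    rintro ⟨t, rfl⟩
    apply hq
    simp

theorem pv_drop_cons (s : List Char) (i : Nat) (h : i < s.length) :
    s.drop i = (s[i]?).getD ' ' :: s.drop (i + 1) := by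
  rw [List.drop_eq_getElem_cons h]
  congr 1
  rw [List.getElem?_eq_getElem h]
  rfl

theorem pv_drop3 (s : List Char) (h : 3 ≤ s.length) :
    s.drop (s.length - 3) = [(s[s.length - 3]?).getD ' ', (s[s.length - 2]?).getD ' ', (s[s.length - 1]?).getD ' '] := by
  rw [pv_drop_cons s _ (by omega), show s.length - 3 + 1 = s.length - 2 by omega,
    pv_drop_cons s _ (by omega), show s.length - 2 + 1 = s.length - 1 by omega,
    pv_drop_cons s _ (by omega), show s.length - 1 + 1 = s.length by omega, List.drop_length]

theorem pv_drop4 (s : List Char) (h : 4 ≤ s.length) :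
    s.drop (s.length - 4) = [(s[s.length - 4]?).getD ' ', (s[s.length - 3]?).getD ' ', (s[s.length - 2]?).getD ' ', (s[s.length - 1]?).getD ' '] := by
  rw [pv_drop_cons s _ (by omega), show s.length - 4 + 1 = s.length - 3 by omega, pv_drop3 s (by omega)]

theorem pv_b1_iff (s : List Char) :
    (4 < s.length ∧ (s.drop (s.length - 4) = "USDT".toList ∨ s.drop (s.length - 4) = "USDC".toList)) ↔
    (4 < s.length ∧ ((s[s.length - 4]?).getD ' ' = 'U' ∧ (s[s.length - 3]?).getD ' ' = 'S' ∧ (s[s.length - 2]?).getD ' ' = 'D' ∧ ((s[s.length - 1]?).getD ' ' = 'T' ∨ (s[s.length - 1]?).getD ' ' = 'C'))) := by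
  by_cases hn : 4 < s.length
  · simp only [hn, true_and]
    rw [pv_drop4 s (by omega)]
    simp only [show "USDT".toList = ['U','S','D','T'] from rfl, show "USDC".toList = ['U','S','D','C'] from rfl, List.cons.injEq, and_true]
    tauto
  · simp [hn]

theorem pv_b2_iff (s : List Char) :
    (3 < s.length ∧ (s.drop (s.length - 3) = "USD".toList ∨ s.drop (s.length - 3) = "EUR".toList ∨ s.drop (s.length - 3) = "GBP".toList)) ↔
    (3 < s.length ∧ (((s[s.length - 3]?).getD ' ' = 'U' ∧ (s[s.length - 2]?).getD ' ' = 'S' ∧ (s[s.length - 1]?).getD ' ' = 'D') ∨ ((s[s.length - 3]?).getD ' ' = 'E' ∧ (s[s.length - 2]?).getD ' ' = 'U' ∧ (s[s.length - 1]?).getD ' ' = 'R') ∨ ((s[s.length - 3]?).getD ' ' = 'G' ∧ (s[s.length - 2]?).getD ' ' = 'B' ∧ (s[s.length - 1]?).getD ' ' = 'P'))) := by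
  by_cases hn : 3 < s.length
  · simp only [hn, true_and]
    rw [pv_drop3 s (by omega)]
    simp only [show "USD".toList = ['U','S','D'] from rfl, show "EUR".toList = ['E','U','R'] from rfl, show "GBP".toList = ['G','B','P'] from rfl, List.cons.injEq, and_true]
  · simp [hn]

theorem pv_quoteLoop_eq (symbol : String) :
    pvQuoteLoop symbol ["USDT".toList, "USDC".toList, "USD".toList, "EUR".toList, "GBP".toList]
    = pvG symbol.toList := by
  set s := symbol.toList with hs
  simp only [pvQuoteLoop, pv_endswith_eq_drop, ← hs,
    show ("USDT".toList.length) = 4 from rfl, show ("USDC".toList.length) = 4 from rfl,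
    show ("USD".toList.length) = 3 from rfl, show ("EUR".toList.length) = 3 from rfl,
    show ("GBP".toList.length) = 3 from rfl, Bool.and_eq_true, decide_eq_true_eq]
  by_cases hT : s.drop (s.length - 4) = "USDT".toList ∧ 4 < s.length
  · rw [if_pos hT]
    unfold pvG
    rw [if_pos ⟨hT.2, Or.inl hT.1⟩, PySem.Chars.slice_eq_listSlice,
      PySem.List.slice_to_neg_natCast s 4 (by omega), hT.1]
  rw [if_neg hT]
  by_cases hC : s.drop (s.length - 4) = "USDC".toList ∧ 4 < s.length
  · rw [if_pos hC]
    unfold pvG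
    rw [if_pos ⟨hC.2, Or.inr hC.1⟩, PySem.Chars.slice_eq_listSlice,
      PySem.List.slice_to_neg_natCast s 4 (by omega), hC.1]
  rw [if_neg hC]
  have hb1 : ¬ (4 < s.length ∧ (s.drop (s.length - 4) = "USDT".toList ∨ s.drop (s.length - 4) = "USDC".toList)) := by
    rintro ⟨h4, h | h⟩
    · exact hT ⟨h, h4⟩
    · exact hC ⟨h, h4⟩
  by_cases hU : s.drop (s.length - 3) = "USD".toList ∧ 3 < s.length
  · rw [if_pos hU]
    unfold pvG
    rw [if_neg hb1, if_pos ⟨hU.2, Or.inl hU.1⟩, PySem.Chars.slice_eq_listSlice,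
      PySem.List.slice_to_neg_natCast s 3 (by omega), hU.1]
  rw [if_neg hU]
  by_cases hE : s.drop (s.length - 3) = "EUR".toList ∧ 3 < s.length
  · rw [if_pos hE]
    unfold pvG
    rw [if_neg hb1, if_pos ⟨hE.2, Or.inr (Or.inl hE.1)⟩, PySem.Chars.slice_eq_listSlice,
      PySem.List.slice_to_neg_natCast s 3 (by omega), hE.1]
  rw [if_neg hE]
  by_cases hG : s.drop (s.length - 3) = "GBP".toList ∧ 3 < s.length
  · rw [if_pos hG]
    unfold pvG
    rw [if_neg hb1, if_pos ⟨hG.2, Or.inr (Or.inr hG.1)⟩, PySem.Chars.slice_eq_listSlice,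
      PySem.List.slice_to_neg_natCast s 3 (by omega), hG.1]
  rw [if_neg hG]
  have hb2 : ¬ (3 < s.length ∧ (s.drop (s.length - 3) = "USD".toList ∨ s.drop (s.length - 3) = "EUR".toList ∨ s.drop (s.length - 3) = "GBP".toList)) := by
    rintro ⟨h3, h | h | h⟩
    · exact hU ⟨h, h3⟩
    · exact hE ⟨h, h3⟩
    · exact hG ⟨h, h3⟩
  rw [pvG_none s hb1 hb2, hs, String.ofList_toList]

theorem pvTrans_eq : pvTrans = PySem.Dict.mk [((0,'T'),1),((1,'D'),2),((2,'S'),3),((3,'U'),4),((0,'C'),5),((5,'D'),6),((6,'S'),7),((7,'U'),8),((0,'D'),9),((9,'S'),10),((10,'U'),11),((0,'R'),12),((12,'U'),13),((13,'E'),14),((0,'P'),15),((15,'B'),16),((16,'G'),17)] := by rfl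

theorem pv_look0 (c : Char) : pvTrans.get? (0, c) =
    if c = 'T' then some 1 else if c = 'C' then some 5 else if c = 'D' then some 9
    else if c = 'R' then some 12 else if c = 'P' then some 15 else none := by
  rw [pvTrans_eq]
  by_cases hT : c = 'T'
  · subst hT; rfl
  by_cases hC : c = 'C'
  · subst hC; rfl
  by_cases hD : c = 'D'
  · subst hD; rfl
  by_cases hR : c = 'R'
  · subst hR; rfl
  by_cases hP : c = 'P'
  · subst hP; rfl
  simp [PySem.Dict.get?, hT, hC, hD, hR, hP, Ne.symm hT, Ne.symm hC, Ne.symm hD, Ne.symm hR, Ne.symm hP]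

theorem pv_look1 (c : Char) : pvTrans.get? (1, c) = if c = 'D' then some 2 else none := by
  rw [pvTrans_eq]
  by_cases h : c = 'D'
  · subst h; rfl
  · simp [PySem.Dict.get?, h, Ne.symm h]

theorem pv_look2 (c : Char) : pvTrans.get? (2, c) = if c = 'S' then some 3 else none := by
  rw [pvTrans_eq]
  by_cases h : c = 'S'
  · subst h; rfl
  · simp [PySem.Dict.get?, h, Ne.symm h]

theorem pv_look3 (c : Char) : pvTrans.get? (3, c) = if c = 'U' then some 4 else none := by
  rw [pvTrans_eq]
  by_cases h : c = 'U'
  · subst h; rfl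
  · simp [PySem.Dict.get?, h, Ne.symm h]

theorem pv_look5 (c : Char) : pvTrans.get? (5, c) = if c = 'D' then some 6 else none := by
  rw [pvTrans_eq]
  by_cases h : c = 'D'
  · subst h; rfl
  · simp [PySem.Dict.get?, h, Ne.symm h]

theorem pv_look6 (c : Char) : pvTrans.get? (6, c) = if c = 'S' then some 7 else none := by
  rw [pvTrans_eq]
  by_cases h : c = 'S'
  · subst h; rfl
  · simp [PySem.Dict.get?, h, Ne.symm h]

theorem pv_look7 (c : Char) : pvTrans.get? (7, c) = if c = 'U' then some 8 else none := by
  rw [pvTrans_eq]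
  by_cases h : c = 'U'
  · subst h; rfl
  · simp [PySem.Dict.get?, h, Ne.symm h]

theorem pv_look9 (c : Char) : pvTrans.get? (9, c) = if c = 'S' then some 10 else none := by
  rw [pvTrans_eq]
  by_cases h : c = 'S'
  · subst h; rfl
  · simp [PySem.Dict.get?, h, Ne.symm h]

theorem pv_look10 (c : Char) : pvTrans.get? (10, c) = if c = 'U' then some 11 else none := by
  rw [pvTrans_eq]
  by_cases h : c = 'U'
  · subst h; rfl
  · simp [PySem.Dict.get?, h, Ne.symm h]

theorem pv_look12 (c : Char) : pvTrans.get? (12, c) = if c = 'U' then some 13 else none := by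
  rw [pvTrans_eq]
  by_cases h : c = 'U'
  · subst h; rfl
  · simp [PySem.Dict.get?, h, Ne.symm h]

theorem pv_look13 (c : Char) : pvTrans.get? (13, c) = if c = 'E' then some 14 else none := by
  rw [pvTrans_eq]
  by_cases h : c = 'E'
  · subst h; rfl
  · simp [PySem.Dict.get?, h, Ne.symm h]

theorem pv_look15 (c : Char) : pvTrans.get? (15, c) = if c = 'B' then some 16 else none := by
  rw [pvTrans_eq]
  by_cases h : c = 'B'
  · subst h; rfl
  · simp [PySem.Dict.get?, h, Ne.symm h]

theorem pv_look16 (c : Char) : pvTrans.get? (16, c) = if c = 'G' then some 17 else none := by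
  rw [pvTrans_eq]
  by_cases h : c = 'G'
  · subst h; rfl
  · simp [PySem.Dict.get?, h, Ne.symm h]

theorem pv_read (s : List Char) (k : Nat) (h : k < s.length - 1) :
    PySem.List.pyGet? s ((s.length : Int) - 1 - k) = some ((s[s.length - (k + 1)]?).getD ' ') := by
  have e : ((s.length : Int) - 1 - k) = ((s.length - (k + 1) : Nat) : Int) := by omega
  rw [e, PySem.List.pyGet?_natCast, List.getElem?_eq_getElem (by omega)]
  rfl

theorem pv_walk_eq (s : List Char) : pvWalk s 0 0 = pvG s := by
  by_cases hk0 : 0 < s.length - 1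
  case neg =>
    rw [pvWalk, dif_neg hk0]
    exact (pvG_none s (by rw [pv_b1_iff s]; rintro ⟨hb, hc⟩; first | omega | simp_all) (by rw [pv_b2_iff s]; rintro ⟨hb, hc⟩; first | omega | simp_all)).symm
  case pos =>
  rw [pvWalk, dif_pos hk0, pv_read s 0 hk0]
  norm_num
  by_cases hT0 : (s[s.length - 1]?).getD ' ' = 'T'
  · have hc1 := hT0
    rw [hc1]
    simp only [pv_look0, reduceIte, show pvAccept.contains 1 = false from rfl, Bool.false_eq_true, if_false]
    show pvWalk s 1 1 = pvG s
    by_cases hk1 : 1 < s.length - 1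
    case neg =>
      rw [pvWalk, dif_neg hk1]
      exact (pvG_none s (by rw [pv_b1_iff s]; rintro ⟨hb, hc⟩; first | omega | simp_all) (by rw [pv_b2_iff s]; rintro ⟨hb, hc⟩; first | omega | simp_all)).symm
    case pos =>
    rw [pvWalk, dif_pos hk1, pv_read s 1 hk1]
    norm_num
    by_cases hc2 : (s[s.length - 2]?).getD ' ' = 'D'
    case neg =>
      simp only [pv_look1, hc2, if_false]
      exact (pvG_none s (by rw [pv_b1_iff s]; rintro ⟨hb, hc⟩; first | omega | simp_all) (by rw [pv_b2_iff s]; rintro ⟨hb, hc⟩; first | omega | simp_all)).symm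
    case pos =>
    rw [hc2]
    simp only [pv_look1, reduceIte, show pvAccept.contains 2 = false from rfl, Bool.false_eq_true, if_false]
    show pvWalk s 2 2 = pvG s
    by_cases hk2 : 2 < s.length - 1
    case neg =>
      rw [pvWalk, dif_neg hk2]
      exact (pvG_none s (by rw [pv_b1_iff s]; rintro ⟨hb, hc⟩; first | omega | simp_all) (by rw [pv_b2_iff s]; rintro ⟨hb, hc⟩; first | omega | simp_all)).symm
    case pos =>
    rw [pvWalk, dif_pos hk2, pv_read s 2 hk2]
    norm_num
    by_cases hc3 : (s[s.length - 3]?).getD ' ' = 'S'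
    case neg =>
      simp only [pv_look2, hc3, if_false]
      exact (pvG_none s (by rw [pv_b1_iff s]; rintro ⟨hb, hc⟩; first | omega | simp_all) (by rw [pv_b2_iff s]; rintro ⟨hb, hc⟩; first | omega | simp_all)).symm
    case pos =>
    rw [hc3]
    simp only [pv_look2, reduceIte, show pvAccept.contains 3 = false from rfl, Bool.false_eq_true, if_false]
    show pvWalk s 3 3 = pvG s
    by_cases hk3 : 3 < s.length - 1
    case neg =>
      rw [pvWalk, dif_neg hk3]
      exact (pvG_none s (by rw [pv_b1_iff s]; rintro ⟨hb, hc⟩; first | omega | simp_all) (by rw [pv_b2_iff s]; rintro ⟨hb, hc⟩; first | omega | simp_all)).symm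
    case pos =>
    rw [pvWalk, dif_pos hk3, pv_read s 3 hk3]
    norm_num
    by_cases hc4 : (s[s.length - 4]?).getD ' ' = 'U'
    case neg =>
      simp only [pv_look3, hc4, if_false]
      exact (pvG_none s (by rw [pv_b1_iff s]; rintro ⟨hb, hc⟩; first | omega | simp_all) (by rw [pv_b2_iff s]; rintro ⟨hb, hc⟩; first | omega | simp_all)).symm
    case pos =>
    rw [hc4]
    simp only [pv_look3, reduceIte, show pvAccept.contains 4 = true from rfl, if_true]
    have hb := (pv_b1_iff s).mpr ⟨by omega, hc4, hc3, hc2, Or.inl hc1⟩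
    unfold pvG
    rw [if_pos hb]
    have e : ((s.length : Int) - 4) = ((s.length - 4 : Nat) : Int) := by omega
    rw [e, PySem.List.slice_to_natCast, PySem.List.slice_from_natCast, ← String.ofList_append]
  by_cases hC0 : (s[s.length - 1]?).getD ' ' = 'C'
  · have hc1 := hC0
    rw [hc1]
    simp only [pv_look0, reduceIte, show pvAccept.contains 5 = false from rfl, Bool.false_eq_true, if_false]
    show pvWalk s 5 1 = pvG s
    by_cases hk1 : 1 < s.length - 1
    case neg =>
      rw [pvWalk, dif_neg hk1]
      exact (pvG_none s (by rw [pv_b1_iff s]; rintro ⟨hb, hc⟩; first | omega | simp_all) (by rw [pv_b2_iff s]; rintro ⟨hb, hc⟩; first | omega | simp_all)).symm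
    case pos =>
    rw [pvWalk, dif_pos hk1, pv_read s 1 hk1]
    norm_num
    by_cases hc2 : (s[s.length - 2]?).getD ' ' = 'D'
    case neg =>
      simp only [pv_look5, hc2, if_false]
      exact (pvG_none s (by rw [pv_b1_iff s]; rintro ⟨hb, hc⟩; first | omega | simp_all) (by rw [pv_b2_iff s]; rintro ⟨hb, hc⟩; first | omega | simp_all)).symm
    case pos =>
    rw [hc2]
    simp only [pv_look5, reduceIte, show pvAccept.contains 6 = false from rfl, Bool.false_eq_true, if_false]
    show pvWalk s 6 2 = pvG s
    by_cases hk2 : 2 < s.length - 1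
    case neg =>
      rw [pvWalk, dif_neg hk2]
      exact (pvG_none s (by rw [pv_b1_iff s]; rintro ⟨hb, hc⟩; first | omega | simp_all) (by rw [pv_b2_iff s]; rintro ⟨hb, hc⟩; first | omega | simp_all)).symm
    case pos =>
    rw [pvWalk, dif_pos hk2, pv_read s 2 hk2]
    norm_num
    by_cases hc3 : (s[s.length - 3]?).getD ' ' = 'S'
    case neg =>
      simp only [pv_look6, hc3, if_false]
      exact (pvG_none s (by rw [pv_b1_iff s]; rintro ⟨hb, hc⟩; first | omega | simp_all) (by rw [pv_b2_iff s]; rintro ⟨hb, hc⟩; first | omega | simp_all)).symm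
    case pos =>
    rw [hc3]
    simp only [pv_look6, reduceIte, show pvAccept.contains 7 = false from rfl, Bool.false_eq_true, if_false]
    show pvWalk s 7 3 = pvG s
    by_cases hk3 : 3 < s.length - 1
    case neg =>
      rw [pvWalk, dif_neg hk3]
      exact (pvG_none s (by rw [pv_b1_iff s]; rintro ⟨hb, hc⟩; first | omega | simp_all) (by rw [pv_b2_iff s]; rintro ⟨hb, hc⟩; first | omega | simp_all)).symm
    case pos =>
    rw [pvWalk, dif_pos hk3, pv_read s 3 hk3]
    norm_num
    by_cases hc4 : (s[s.length - 4]?).getD ' ' = 'U'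
    case neg =>
      simp only [pv_look7, hc4, if_false]
      exact (pvG_none s (by rw [pv_b1_iff s]; rintro ⟨hb, hc⟩; first | omega | simp_all) (by rw [pv_b2_iff s]; rintro ⟨hb, hc⟩; first | omega | simp_all)).symm
    case pos =>
    rw [hc4]
    simp only [pv_look7, reduceIte, show pvAccept.contains 8 = true from rfl, if_true]
    have hb := (pv_b1_iff s).mpr ⟨by omega, hc4, hc3, hc2, Or.inr hc1⟩
    unfold pvG
    rw [if_pos hb]
    have e : ((s.length : Int) - 4) = ((s.length - 4 : Nat) : Int) := by omega
    rw [e, PySem.List.slice_to_natCast, PySem.List.slice_from_natCast, ← String.ofList_append]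
  by_cases hD0 : (s[s.length - 1]?).getD ' ' = 'D'
  · have hc1 := hD0
    rw [hc1]
    simp only [pv_look0, reduceIte, show pvAccept.contains 9 = false from rfl, Bool.false_eq_true, if_false]
    show pvWalk s 9 1 = pvG s
    by_cases hk1 : 1 < s.length - 1
    case neg =>
      rw [pvWalk, dif_neg hk1]
      exact (pvG_none s (by rw [pv_b1_iff s]; rintro ⟨hb, hc⟩; first | omega | simp_all) (by rw [pv_b2_iff s]; rintro ⟨hb, hc⟩; first | omega | simp_all)).symm
    case pos =>
    rw [pvWalk, dif_pos hk1, pv_read s 1 hk1]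
    norm_num
    by_cases hc2 : (s[s.length - 2]?).getD ' ' = 'S'
    case neg =>
      simp only [pv_look9, hc2, if_false]
      exact (pvG_none s (by rw [pv_b1_iff s]; rintro ⟨hb, hc⟩; first | omega | simp_all) (by rw [pv_b2_iff s]; rintro ⟨hb, hc⟩; first | omega | simp_all)).symm
    case pos =>
    rw [hc2]
    simp only [pv_look9, reduceIte, show pvAccept.contains 10 = false from rfl, Bool.false_eq_true, if_false]
    show pvWalk s 10 2 = pvG s
    by_cases hk2 : 2 < s.length - 1
    case neg =>
      rw [pvWalk, dif_neg hk2]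
      exact (pvG_none s (by rw [pv_b1_iff s]; rintro ⟨hb, hc⟩; first | omega | simp_all) (by rw [pv_b2_iff s]; rintro ⟨hb, hc⟩; first | omega | simp_all)).symm
    case pos =>
    rw [pvWalk, dif_pos hk2, pv_read s 2 hk2]
    norm_num
    by_cases hc3 : (s[s.length - 3]?).getD ' ' = 'U'
    case neg =>
      simp only [pv_look10, hc3, if_false]
      exact (pvG_none s (by rw [pv_b1_iff s]; rintro ⟨hb, hc⟩; first | omega | simp_all) (by rw [pv_b2_iff s]; rintro ⟨hb, hc⟩; first | omega | simp_all)).symm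
    case pos =>
    rw [hc3]
    simp only [pv_look10, reduceIte, show pvAccept.contains 11 = true from rfl, if_true]
    have hb := (pv_b2_iff s).mpr ⟨by omega, Or.inl ⟨hc3, hc2, hc1⟩⟩
    unfold pvG
    rw [if_neg (by rw [pv_b1_iff s]; rintro ⟨hb, hc⟩; first | omega | simp_all), if_pos hb]
    have e : ((s.length : Int) - 3) = ((s.length - 3 : Nat) : Int) := by omega
    rw [e, PySem.List.slice_to_natCast, PySem.List.slice_from_natCast, ← String.ofList_append]
  by_cases hR0 : (s[s.length - 1]?).getD ' ' = 'R'
  · have hc1 := hR0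
    rw [hc1]
    simp only [pv_look0, reduceIte, show pvAccept.contains 12 = false from rfl, Bool.false_eq_true, if_false]
    show pvWalk s 12 1 = pvG s
    by_cases hk1 : 1 < s.length - 1
    case neg =>
      rw [pvWalk, dif_neg hk1]
      exact (pvG_none s (by rw [pv_b1_iff s]; rintro ⟨hb, hc⟩; first | omega | simp_all) (by rw [pv_b2_iff s]; rintro ⟨hb, hc⟩; first | omega | simp_all)).symm
    case pos =>
    rw [pvWalk, dif_pos hk1, pv_read s 1 hk1]
    norm_num
    by_cases hc2 : (s[s.length - 2]?).getD ' ' = 'U'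
    case neg =>
      simp only [pv_look12, hc2, if_false]
      exact (pvG_none s (by rw [pv_b1_iff s]; rintro ⟨hb, hc⟩; first | omega | simp_all) (by rw [pv_b2_iff s]; rintro ⟨hb, hc⟩; first | omega | simp_all)).symm
    case pos =>
    rw [hc2]
    simp only [pv_look12, reduceIte, show pvAccept.contains 13 = false from rfl, Bool.false_eq_true, if_false]
    show pvWalk s 13 2 = pvG s
    by_cases hk2 : 2 < s.length - 1
    case neg =>
      rw [pvWalk, dif_neg hk2]
      exact (pvG_none s (by rw [pv_b1_iff s]; rintro ⟨hb, hc⟩; first | omega | simp_all) (by rw [pv_b2_iff s]; rintro ⟨hb, hc⟩; first | omega | simp_all)).symm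
    case pos =>
    rw [pvWalk, dif_pos hk2, pv_read s 2 hk2]
    norm_num
    by_cases hc3 : (s[s.length - 3]?).getD ' ' = 'E'
    case neg =>
      simp only [pv_look13, hc3, if_false]
      exact (pvG_none s (by rw [pv_b1_iff s]; rintro ⟨hb, hc⟩; first | omega | simp_all) (by rw [pv_b2_iff s]; rintro ⟨hb, hc⟩; first | omega | simp_all)).symm
    case pos =>
    rw [hc3]
    simp only [pv_look13, reduceIte, show pvAccept.contains 14 = true from rfl, if_true]
    have hb := (pv_b2_iff s).mpr ⟨by omega, Or.inr (Or.inl ⟨hc3, hc2, hc1⟩)⟩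
    unfold pvG
    rw [if_neg (by rw [pv_b1_iff s]; rintro ⟨hb, hc⟩; first | omega | simp_all), if_pos hb]
    have e : ((s.length : Int) - 3) = ((s.length - 3 : Nat) : Int) := by omega
    rw [e, PySem.List.slice_to_natCast, PySem.List.slice_from_natCast, ← String.ofList_append]
  by_cases hP0 : (s[s.length - 1]?).getD ' ' = 'P'
  · have hc1 := hP0
    rw [hc1]
    simp only [pv_look0, reduceIte, show pvAccept.contains 15 = false from rfl, Bool.false_eq_true, if_false]
    show pvWalk s 15 1 = pvG s
    by_cases hk1 : 1 < s.length - 1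
    case neg =>
      rw [pvWalk, dif_neg hk1]
      exact (pvG_none s (by rw [pv_b1_iff s]; rintro ⟨hb, hc⟩; first | omega | simp_all) (by rw [pv_b2_iff s]; rintro ⟨hb, hc⟩; first | omega | simp_all)).symm
    case pos =>
    rw [pvWalk, dif_pos hk1, pv_read s 1 hk1]
    norm_num
    by_cases hc2 : (s[s.length - 2]?).getD ' ' = 'B'
    case neg =>
      simp only [pv_look15, hc2, if_false]
      exact (pvG_none s (by rw [pv_b1_iff s]; rintro ⟨hb, hc⟩; first | omega | simp_all) (by rw [pv_b2_iff s]; rintro ⟨hb, hc⟩; first | omega | simp_all)).symm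
    case pos =>
    rw [hc2]
    simp only [pv_look15, reduceIte, show pvAccept.contains 16 = false from rfl, Bool.false_eq_true, if_false]
    show pvWalk s 16 2 = pvG s
    by_cases hk2 : 2 < s.length - 1
    case neg =>
      rw [pvWalk, dif_neg hk2]
      exact (pvG_none s (by rw [pv_b1_iff s]; rintro ⟨hb, hc⟩; first | omega | simp_all) (by rw [pv_b2_iff s]; rintro ⟨hb, hc⟩; first | omega | simp_all)).symm
    case pos =>
    rw [pvWalk, dif_pos hk2, pv_read s 2 hk2]
    norm_num
    by_cases hc3 : (s[s.length - 3]?).getD ' ' = 'G'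
    case neg =>
      simp only [pv_look16, hc3, if_false]
      exact (pvG_none s (by rw [pv_b1_iff s]; rintro ⟨hb, hc⟩; first | omega | simp_all) (by rw [pv_b2_iff s]; rintro ⟨hb, hc⟩; first | omega | simp_all)).symm
    case pos =>
    rw [hc3]
    simp only [pv_look16, reduceIte, show pvAccept.contains 17 = true from rfl, if_true]
    have hb := (pv_b2_iff s).mpr ⟨by omega, Or.inr (Or.inr ⟨hc3, hc2, hc1⟩)⟩
    unfold pvG
    rw [if_neg (by rw [pv_b1_iff s]; rintro ⟨hb, hc⟩; first | omega | simp_all), if_pos hb]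
    have e : ((s.length : Int) - 3) = ((s.length - 3 : Nat) : Int) := by omega
    rw [e, PySem.List.slice_to_natCast, PySem.List.slice_from_natCast, ← String.ofList_append]
  simp only [pv_look0, hT0, hC0, hD0, hR0, hP0, if_false]
  exact (pvG_none s (by rw [pv_b1_iff s]; rintro ⟨hb, hc⟩; first | omega | simp_all) (by rw [pv_b2_iff s]; rintro ⟨hb, hc⟩; first | omega | simp_all)).symm

-- ===== VERDICT (by name: the statement is the Claim_ definition above) =====
theorem to_coinbase_product_id_py_spec : Claim_equal_to_coinbase_product_id_py := by
  intro symbol _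
  unfold Spec_to_coinbase_product_id_py to_coinbase_product_id_py to_coinbase_product_id_py_alt
  by_cases hin : PySem.Str.isIn "-" symbol = true
  · rw [if_pos hin, if_pos hin]
  · rw [if_neg hin, if_neg hin, pv_quoteLoop_eq, pv_walk_eq]
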